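-- pv_equiv track=rewrite | github.com/the-deep/server | deep_migration/management/commands/migrate_entry.py | get_matrix1d_attribute
-- ===== SOURCE A (Python) =====
-- def get_matrix1d_attribute(selections):
--     attribute = {}
--     for selection in selections:
--         pillar = selection['pillar']
--         subpillar = selection['subpillar']
--         if pillar not in attribute:
--             attribute[pillar] = {}
--         attribute[pillar][subpillar] = True
--     return attribute
-- ===== SOURCE B (Python) =====
-- def get_matrix1d_attribute(selections):
--     pillars = dict.fromkeys(s['pillar'] for s in selections)
--     return {
--         p: {s['subpillar']: True for s in selections if s['pillar'] == p}
--         for p in pillars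
--     }
-- ===== Notes on version B (the rewrite author's own statement) =====
-- stated objective: idiomatic
-- what changed: Replaces the single accumulating pass that mutates a nested dict with a two-phase comprehension: first collect the distinct pillars in first-occurrence order (dict.fromkeys), then build each pillar's inner dict by its own comprehension rescanning the selections.
import Mathlib
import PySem

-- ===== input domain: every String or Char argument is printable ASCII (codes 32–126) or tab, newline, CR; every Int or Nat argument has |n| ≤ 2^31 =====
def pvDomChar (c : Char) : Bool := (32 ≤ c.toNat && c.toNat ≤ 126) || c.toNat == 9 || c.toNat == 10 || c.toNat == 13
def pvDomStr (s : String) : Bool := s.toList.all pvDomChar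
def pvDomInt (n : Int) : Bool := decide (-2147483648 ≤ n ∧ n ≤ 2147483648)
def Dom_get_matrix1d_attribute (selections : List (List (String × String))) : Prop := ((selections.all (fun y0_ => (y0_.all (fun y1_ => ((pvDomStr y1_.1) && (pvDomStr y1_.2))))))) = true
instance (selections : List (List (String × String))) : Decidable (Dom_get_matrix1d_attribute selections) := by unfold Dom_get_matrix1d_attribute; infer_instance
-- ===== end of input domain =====

-- B is an idiomatic two-phase re-implementation (distinct pillars first, then one inner
-- comprehension per pillar); equivalence is about the return value (neither mutates input).

-- ===== PORT A =====
def get_matrix1d_attribute (selections : List (List (String × String))) : List (String × List (String × Bool)) :=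
  ((selections.foldl
      (fun (attr : PySem.Dict String (PySem.Dict String Bool)) selection =>
        match (PySem.Dict.mk selection).get? "pillar", (PySem.Dict.mk selection).get? "subpillar" with
        | some pillar, some subpillar =>
            let attr := if attr.contains pillar then attr
                             else attr.insert pillar PySem.Dict.empty
            attr.insert pillar ((attr.getD pillar PySem.Dict.empty).insert subpillar true)
        | _, _ => attr)   -- KeyError: excluded by Pre_
      PySem.Dict.empty).items.map (fun pr => (pr.1, pr.2.items)))

-- ===== PORT B =====
-- pillars = dict.fromkeys(s['pillar'] for s in selections)  (distinct keys, first-occurrence order)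
def pvPillarsB (selections : List (List (String × String))) : List String :=
  PySem.Set.ofList (selections.filterMap (fun s => (PySem.Dict.mk s).get? "pillar"))

-- {s['subpillar']: True for s in selections if s['pillar'] == p}
def pvSubDictB (selections : List (List (String × String))) (p : String) : List (String × Bool) :=
  (PySem.Set.ofList
    ((selections.filter (fun s => (PySem.Dict.mk s).get? "pillar" == some p)).filterMap
      (fun s => (PySem.Dict.mk s).get? "subpillar"))).map (fun sp => (sp, true))

def get_matrix1d_attribute_alt (selections : List (List (String × String))) : List (String × List (String × Bool)) :=
  (pvPillarsB selections).map (fun p => (p, pvSubDictB selections p))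

-- ===== PRECONDITION & SPEC =====
-- Pre_ excludes exactly the selections on which Python A raises KeyError: a selection dict
-- lacking the key 'pillar' or the key 'subpillar'.
def Pre_get_matrix1d_attribute (selections : List (List (String × String))) : Prop :=
  ∀ s ∈ selections,
    ((PySem.Dict.mk s).get? "pillar").isSome = true ∧ ((PySem.Dict.mk s).get? "subpillar").isSome = true
instance (selections : List (List (String × String))) : Decidable (Pre_get_matrix1d_attribute selections) := by
  unfold Pre_get_matrix1d_attribute; infer_instance

def pvWitness_get_matrix1d_attribute : (List (List (String × String))) :=
  [[("pillar", "p1"), ("subpillar", "s1")], [("pillar", "p1"), ("subpillar", "s2")]]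

def Spec_get_matrix1d_attribute (selections : List (List (String × String))) (out : List (String × List (String × Bool))) : Prop := out = get_matrix1d_attribute_alt selections
instance (selections : List (List (String × String))) (out : List (String × List (String × Bool))) : Decidable (Spec_get_matrix1d_attribute selections out) := by unfold Spec_get_matrix1d_attribute; infer_instance

-- ===== CLAIM (what is proved, stated in full; the proofs are below) =====
def Claim_equal_get_matrix1d_attribute : Prop := ∀ (selections : List (List (String × String))), Dom_get_matrix1d_attribute selections → Pre_get_matrix1d_attribute selections → Spec_get_matrix1d_attribute selections (get_matrix1d_attribute selections)

-- ===== LEMMAS AND PROOFS =====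

-- the pillar/subpillar pair extracted from each selection (total; under Pre_ both keys exist)
def pvPairs (selections : List (List (String × String))) : List (String × String) :=
  selections.map (fun s =>
    (((PySem.Dict.mk s).get? "pillar").getD "", ((PySem.Dict.mk s).get? "subpillar").getD ""))

-- A's loop body, on extracted pairs
def pvStep (d : PySem.Dict String (PySem.Dict String Bool)) (x : String × String) :
    PySem.Dict String (PySem.Dict String Bool) :=
  let d := if d.contains x.1 then d else d.insert x.1 PySem.Dict.empty
  d.insert x.1 ((d.getD x.1 PySem.Dict.empty).insert x.2 true)

def pvInner (L : List (String × String)) : PySem.Dict String Bool :=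
  (L.map (·.2)).foldl (fun d sp => d.insert sp true) PySem.Dict.empty

lemma pvInner_items (subs : List String) :
    (subs.foldl (fun d sp => d.insert sp true) PySem.Dict.empty).items
      = (PySem.Set.ofList subs).map (fun sp => (sp, true)) := by
  induction subs using List.reverseRecOn with
  | nil => rfl
  | append_singleton subs sp ih =>
    have hkeys : (subs.foldl (fun d sp => d.insert sp true) PySem.Dict.empty).keys
        = PySem.Set.ofList subs := by
      have h := PySem.Dict.keys_foldl_insert (l := subs) (f := fun _ _ => true)
        (d := (PySem.Dict.empty : PySem.Dict String Bool))
      simpa [PySem.Dict.keys_empty, PySem.Set.update_nil_left] using h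
    rw [List.foldl_append, List.foldl_cons, List.foldl_nil, PySem.Set.ofList_append_singleton]
    by_cases hm : sp ∈ subs
    · have hc : (subs.foldl (fun d sp => d.insert sp true) PySem.Dict.empty).contains sp = true := by
        rw [PySem.Dict.contains_iff_mem_keys, hkeys]
        exact (PySem.Set.mem_ofList _ _).mpr hm
      rw [PySem.Dict.items_insert_of_contains _ _ hc, ih,
          PySem.Set.add_of_mem ((PySem.Set.mem_ofList _ _).mpr hm), List.map_map]
      apply List.map_congr_left
      intro q hq
      by_cases hqp : q = sp
      · simp [hqp]
      · simp [hqp]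
    · have hc : (subs.foldl (fun d sp => d.insert sp true) PySem.Dict.empty).contains sp = false := by
        rw [Bool.eq_false_iff, Ne, PySem.Dict.contains_iff_mem_keys, hkeys]
        exact fun hx => hm ((PySem.Set.mem_ofList _ _).mp hx)
      rw [PySem.Dict.items_insert_of_not_contains _ _ hc, ih,
          PySem.Set.add_of_not_mem (fun hx => hm ((PySem.Set.mem_ofList _ _).mp hx)),
          List.map_append]
      simp

lemma pvInner_append_self (L : List (String × String)) (x : String × String) :
    pvInner (L ++ [x]) = (pvInner L).insert x.2 true := by
  simp [pvInner, List.foldl_append]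

lemma pvG_items (L : List (String × String)) :
    (L.foldl pvStep PySem.Dict.empty).items
      = (PySem.Set.ofList (L.map (·.1))).map
          (fun q => (q, pvInner (L.filter (fun pr => pr.1 == q)))) := by
  induction L using List.reverseRecOn with
  | nil => rfl
  | append_singleton L x ih =>
    have hkeys : (L.foldl pvStep PySem.Dict.empty).keys = PySem.Set.ofList (L.map (·.1)) := by
      simp [PySem.Dict.keys, ih, Function.comp_def]
    have hnd : (L.foldl pvStep PySem.Dict.empty).keys.Nodup := by
      rw [hkeys]; exact PySem.Set.nodup_ofList _
    rw [List.foldl_append, List.foldl_cons, List.foldl_nil]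
    simp only [List.map_append, List.map_cons, List.map_nil]
    rw [PySem.Set.ofList_append_singleton]
    by_cases hm : x.1 ∈ L.map (·.1)
    · have hc : (L.foldl pvStep PySem.Dict.empty).contains x.1 = true := by
        rw [PySem.Dict.contains_iff_mem_keys, hkeys]
        exact (PySem.Set.mem_ofList _ _).mpr hm
      have hmem : (x.1, pvInner (L.filter (fun pr => pr.1 == x.1)))
          ∈ (L.foldl pvStep PySem.Dict.empty).items := by
        rw [ih]
        exact List.mem_map.mpr ⟨x.1, (PySem.Set.mem_ofList _ _).mpr hm, rfl⟩
      have hgetD : (L.foldl pvStep PySem.Dict.empty).getD x.1 PySem.Dict.empty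
          = pvInner (L.filter (fun pr => pr.1 == x.1)) :=
        PySem.Dict.getD_of_mem_items _ hmem hnd _
      simp only [pvStep, hc, if_true, hgetD]
      rw [PySem.Dict.items_insert_of_contains _ _ hc, ih, List.map_map,
          PySem.Set.add_of_mem ((PySem.Set.mem_ofList _ _).mpr hm)]
      apply List.map_congr_left
      intro q hq
      by_cases hqp : q = x.1
      · subst hqp
        simp [List.filter_append, pvInner_append_self]
      · have hne : (x.1 == q) = false := by
          simp only [beq_eq_false_iff_ne, ne_eq]
          exact fun hx => hqp hx.symm
        have hne' : (q == x.1) = false := by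
          simp only [beq_eq_false_iff_ne, ne_eq]
          exact hqp
        simp [List.filter_append, hne]
        exact fun h => absurd h hqp
    · have hc : (L.foldl pvStep PySem.Dict.empty).contains x.1 = false := by
        rw [Bool.eq_false_iff, Ne, PySem.Dict.contains_iff_mem_keys, hkeys]
        exact fun hx => hm ((PySem.Set.mem_ofList _ _).mp hx)
      have hfilt : L.filter (fun pr => pr.1 == x.1) = [] := by
        rw [List.filter_eq_nil_iff]
        intro pr hpr
        simp only [beq_iff_eq]
        exact fun hx => hm (List.mem_map.mpr ⟨pr, hpr, hx⟩)
      simp only [pvStep, hc, Bool.false_eq_true, if_false]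
      rw [PySem.Dict.getD_insert_self, PySem.Dict.insert_insert_self,
          PySem.Dict.items_insert_of_not_contains _ _ hc, ih,
          PySem.Set.add_of_not_mem (fun hx => hm ((PySem.Set.mem_ofList _ _).mp hx)),
          List.map_append]
      congr 1
      · apply List.map_congr_left
        intro q hq
        have hne : (x.1 == q) = false := by
          simp only [beq_eq_false_iff_ne, ne_eq]
          exact fun hx => hm ((PySem.Set.mem_ofList _ _).mp (hx ▸ hq))
        simp [List.filter_append, hne]
      · simp [List.filter_append, hfilt, pvInner]

lemma pvFoldA_eq (selections : List (List (String × String)))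
    (h : Pre_get_matrix1d_attribute selections)
    (d : PySem.Dict String (PySem.Dict String Bool)) :
    selections.foldl
      (fun (attr : PySem.Dict String (PySem.Dict String Bool)) selection =>
        match (PySem.Dict.mk selection).get? "pillar", (PySem.Dict.mk selection).get? "subpillar" with
        | some pillar, some subpillar =>
            let attr := if attr.contains pillar then attr
                             else attr.insert pillar PySem.Dict.empty
            attr.insert pillar ((attr.getD pillar PySem.Dict.empty).insert subpillar true)
        | _, _ => attr) d
      = (pvPairs selections).foldl pvStep d := by
  induction selections generalizing d with
  | nil => rfl
  | cons s ss ih =>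
    obtain ⟨hp, hsp⟩ := h s (List.mem_cons_self)
    obtain ⟨p, hp'⟩ := Option.isSome_iff_exists.mp hp
    obtain ⟨sp, hsp'⟩ := Option.isSome_iff_exists.mp hsp
    rw [List.foldl_cons]
    rw [show pvPairs (s :: ss) = (p, sp) :: pvPairs ss by simp [pvPairs, hp', hsp']]
    rw [List.foldl_cons]
    rw [show (match (PySem.Dict.mk s).get? "pillar", (PySem.Dict.mk s).get? "subpillar" with
        | some pillar, some subpillar =>
            let attr := if d.contains pillar then d
                             else d.insert pillar PySem.Dict.empty
            attr.insert pillar ((attr.getD pillar PySem.Dict.empty).insert subpillar true)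
        | _, _ => d) = pvStep d (p, sp) by rw [hp', hsp']; rfl]
    exact ih (fun t ht => h t (List.mem_cons_of_mem _ ht)) _

lemma pvPillarsB_eq (selections : List (List (String × String)))
    (h : Pre_get_matrix1d_attribute selections) :
    pvPillarsB selections = PySem.Set.ofList ((pvPairs selections).map (·.1)) := by
  unfold pvPillarsB
  congr 1
  induction selections with
  | nil => rfl
  | cons s ss ih =>
    obtain ⟨hp, _⟩ := h s (List.mem_cons_self)
    obtain ⟨p, hp'⟩ := Option.isSome_iff_exists.mp hp
    simp only [List.filterMap_cons, hp', pvPairs, List.map_cons]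
    rw [ih (fun t ht => h t (List.mem_cons_of_mem _ ht))]
    simp [pvPairs]

lemma pvSubDictB_eq (selections : List (List (String × String)))
    (h : Pre_get_matrix1d_attribute selections) (p : String) :
    pvSubDictB selections p
      = (PySem.Set.ofList (((pvPairs selections).filter (fun pr => pr.1 == p)).map (·.2))).map
          (fun sp => (sp, true)) := by
  unfold pvSubDictB
  congr 2
  induction selections with
  | nil => rfl
  | cons s ss ih =>
    obtain ⟨hp, hsp⟩ := h s (List.mem_cons_self)
    obtain ⟨q, hp'⟩ := Option.isSome_iff_exists.mp hp
    obtain ⟨sq, hsp'⟩ := Option.isSome_iff_exists.mp hsp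
    have ihh := ih (fun t ht => h t (List.mem_cons_of_mem _ ht))
    rw [show pvPairs (s :: ss) = (q, sq) :: pvPairs ss by simp [pvPairs, hp', hsp']]
    by_cases hq : q = p
    · subst hq
      simp [hp', hsp', ihh]
    · have h1 : ((PySem.Dict.mk s).get? "pillar" == some p) = false := by
        simp [hp', hq]
      have h2 : ((q : String) == p) = false := by simp [hq]
      simp only [List.filter_cons, h1, h2, Bool.false_eq_true, if_false]
      exact ihh

-- ===== VERDICT (by name: the statement is the Claim_ definition above) =====
theorem get_matrix1d_attribute_spec : Claim_equal_get_matrix1d_attribute := by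
  intro selections _ hpre
  unfold Spec_get_matrix1d_attribute get_matrix1d_attribute get_matrix1d_attribute_alt
  rw [pvFoldA_eq selections hpre, pvG_items, pvPillarsB_eq selections hpre, List.map_map]
  apply List.map_congr_left
  intro q hq
  simp only [Function.comp_apply]
  rw [pvSubDictB_eq selections hpre q, ← pvInner_items]
  rfl
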